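-- pv_equiv track=rewrite | github.com/comeandcode/network | small_tools/pktanalyzer.py | check_net
-- ===== SOURCE A (Python) =====
-- def check_net(net, src, dest) -> bool:
--     count = 0
--     index = 0
--     for i, char in enumerate(net):
--         if char == '.':
--             count += 1
--             if count == 3:
--                 index = i + 1
--     return (net[:index] == src[:index]) or (net[:index] == src[:index])
-- ===== SOURCE B (Python) =====
-- def check_net(net, src, dest) -> bool:
--     if net.count('.') < 3:
--         return True
--     dots = 0
--     for a, b in zip(net, src):
--         if a != b:
--             return False
--         if a == '.':
--             dots += 1
--             if dots == 3:
--                 return True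
--     return False
-- ===== Notes on version B (the rewrite author's own statement) =====
-- stated objective: alternative
-- what changed: B walks net and src in lockstep (zip) with early exit at the first mismatch or at the third dot, after a cheap dot-count guard, instead of A's full enumerate scan to locate the third dot followed by a duplicated slice comparison; dest stays unused and the redundant OR is gone.
import Mathlib
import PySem

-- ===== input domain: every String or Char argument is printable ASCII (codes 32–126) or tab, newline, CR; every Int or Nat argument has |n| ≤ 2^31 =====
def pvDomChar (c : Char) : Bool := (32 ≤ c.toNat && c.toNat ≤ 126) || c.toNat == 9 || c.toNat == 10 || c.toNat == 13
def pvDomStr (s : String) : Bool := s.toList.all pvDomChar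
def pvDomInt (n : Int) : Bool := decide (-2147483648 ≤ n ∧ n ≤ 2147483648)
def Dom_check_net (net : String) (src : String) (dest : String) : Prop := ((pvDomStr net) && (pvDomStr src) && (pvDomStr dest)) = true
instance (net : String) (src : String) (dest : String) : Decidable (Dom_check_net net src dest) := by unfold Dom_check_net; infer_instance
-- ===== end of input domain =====

-- B replaces A's full dot-counting scan plus duplicated slice comparison by a single
-- lockstep character walk over net and src with early exit (objective: alternative).

-- ===== PORT A =====
-- loop body of A's 'for i, char in enumerate(net)': state (count, index)
def pvAStep (ci : Int × Int) (p : Int × Char) : Int × Int :=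
  if p.2 == '.' then
    let c := ci.1 + 1
    (c, if c == 3 then p.1 + 1 else ci.2)
  else ci

def check_net (net : String) (src : String) (dest : String) : Bool :=
  let st := (PySem.List.enumerate net.toList).foldl pvAStep (0, 0)
  let index := st.2
  ((PySem.Str.slice net none (some index) == PySem.Str.slice src none (some index)) ||
   (PySem.Str.slice net none (some index) == PySem.Str.slice src none (some index)))

-- ===== PORT B =====
-- B's 'for a, b in zip(net, src)' loop with its three exits:
-- some r = 'return r' inside the loop, none = the loop ran to the end.
def pvAltGo (dots : Nat) : List (Char × Char) → Option Bool
  | [] => none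
  | (a, b) :: rest =>
    if a ≠ b then some false
    else if a = '.' then
      if dots + 1 = 3 then some true else pvAltGo (dots + 1) rest
    else pvAltGo dots rest

def check_net_alt (net : String) (src : String) (dest : String) : Bool :=
  if PySem.Str.count net "." < 3 then true
  else
    match pvAltGo 0 (net.toList.zip src.toList) with
    | some r => r
    | none => false

-- ===== PRECONDITION & SPEC =====
def Spec_check_net (net : String) (src : String) (dest : String) (out : Bool) : Prop := out = check_net_alt net src dest
instance (net : String) (src : String) (dest : String) (out : Bool) : Decidable (Spec_check_net net src dest out) := by unfold Spec_check_net; infer_instance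

-- ===== CLAIM (what is proved, stated in full; the proofs are below) =====
def Claim_equal_check_net : Prop := ∀ (net : String) (src : String) (dest : String), Dom_check_net net src dest → Spec_check_net net src dest (check_net net src dest)

-- ===== LEMMAS AND PROOFS =====

-- position of the k-th '.' in a list (proof-side characterisation)
def pvTd : Nat → List Char → Option Nat
  | _, [] => none
  | k, c :: cs =>
    if c = '.' then (if k = 1 then some 0 else (pvTd (k - 1) cs).map (· + 1))
    else (pvTd k cs).map (· + 1)

theorem pvTd_none_iff (l : List Char) : ∀ k : Nat, 1 ≤ k →
    (pvTd k l = none ↔ l.count '.' < k) := by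
  induction l with
  | nil => intro k hk; simp [pvTd, List.count_nil]; omega
  | cons a t ih =>
    intro k hk
    by_cases ha : a = '.'
    · subst ha
      by_cases h1 : k = 1
      · subst h1; simp [pvTd, List.count_cons]
      · have hk2 : 1 ≤ k - 1 := by omega
        simp [pvTd, h1, List.count_cons, Option.map_eq_none_iff, ih (k - 1) hk2]
        omega
    · simp [pvTd, ha, List.count_cons, Option.map_eq_none_iff, ih k hk]

theorem pvCountGo (l : List Char) : ∀ (fuel acc : Nat), l.length ≤ fuel →
    PySem.Chars.count.go ['.'] fuel l acc = acc + l.count '.' := by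
  induction l with
  | nil =>
    intro fuel acc _
    cases fuel <;> simp [PySem.Chars.count.go]
  | cons a t ih =>
    intro fuel acc hf
    match fuel with
    | 0 => simp at hf
    | Nat.succ n =>
      by_cases ha : a = '.'
      · subst ha
        have : List.isPrefixOf ['.'] ('.' :: t) = true := by simp [List.isPrefixOf]
        simp only [PySem.Chars.count.go, this, if_pos]
        rw [show List.drop (List.length ['.']) ('.' :: t) = t by simp]
        rw [ih n (acc + 1) (by simpa using hf)]
        simp [List.count_cons]; omega
      · have : List.isPrefixOf ['.'] (a :: t) = false := by
          simp [List.isPrefixOf]; exact fun h => ha h.symm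
        simp only [PySem.Chars.count.go, this, if_neg, Bool.false_eq_true, not_false_iff]
        rw [ih n acc (by simpa using hf)]
        simp [List.count_cons, ha]
      
theorem pvCount_dot (l : List Char) : PySem.Chars.count l ['.'] = l.count '.' := by
  simp [PySem.Chars.count, pvCountGo l l.length 0 le_rfl]

-- once count ≥ 3, A's loop never changes index again
theorem pvA_ge3 (l : List Char) : ∀ (start c idx : Int), 3 ≤ c →
    ((PySem.List.enumerate l start).foldl pvAStep (c, idx)).2 = idx := by
  induction l with
  | nil => intro start c idx _; simp [PySem.List.enumerate_nil]
  | cons a t ih =>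
    intro start c idx hc
    rw [PySem.List.enumerate_cons, List.foldl_cons]
    by_cases ha : a = '.'
    · have h3 : (c + 1 == 3) = false := by simp; omega
      simp only [pvAStep, ha, beq_self_eq_true, if_pos, h3, Bool.false_eq_true, if_neg,
        not_false_iff]
      exact ih (start + 1) (c + 1) idx (by omega)
    · simp only [pvAStep, beq_iff_eq, ha, if_neg, not_false_iff]
      exact ih (start + 1) c idx hc

theorem pvA_main (l : List Char) : ∀ (start c : Nat) (idx : Int), c < 3 →
    ((PySem.List.enumerate l (start : Int)).foldl pvAStep ((c : Int), idx)).2 =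
      match pvTd (3 - c) l with
      | none => idx
      | some q => (start : Int) + q + 1 := by
  induction l with
  | nil => intro start c idx _; simp [PySem.List.enumerate_nil, pvTd]
  | cons a t ih =>
    intro start c idx hc
    rw [PySem.List.enumerate_cons, List.foldl_cons]
    by_cases ha : a = '.'
    · subst ha
      by_cases h2 : c = 2
      · subst h2
        have h3 : ((2 : Int) + 1 == 3) = true := by decide
        simp only [pvAStep, beq_self_eq_true, if_pos, Nat.cast_ofNat, h3]
        have hg := pvA_ge3 t ((start : Int) + 1) (2 + 1) ((start : Int) + 1) (by omega)
        rw [hg]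
        norm_num [pvTd]
      · have h3 : (((c : Nat) : Int) + 1 == 3) = false := by simp; omega
        simp only [pvAStep, beq_self_eq_true, if_pos, h3, Bool.false_eq_true, if_neg,
          not_false_iff]
        have hc1 : c + 1 < 3 := by omega
        have : ((c : Int) + 1) = ((c + 1 : Nat) : Int) := by push_cast; ring
        rw [this, show ((start : Int) + 1) = ((start + 1 : Nat) : Int) by push_cast; ring]
        rw [ih (start + 1) (c + 1) idx hc1]
        have hk1 : (3 - c) ≠ 1 := by omega
        have hkk : 3 - c - 1 = 3 - (c + 1) := by omega
        simp only [pvTd, if_pos, hk1, if_neg, not_false_iff, hkk]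
        cases pvTd (3 - (c + 1)) t with
        | none => simp
        | some q => push_cast; simp; ring
    · simp only [pvAStep, beq_iff_eq, ha, if_neg, not_false_iff]
      rw [show ((start : Int) + 1) = ((start + 1 : Nat) : Int) by push_cast; ring]
      rw [ih (start + 1) c idx hc]
      simp only [pvTd, ha, if_neg, not_false_iff]
      cases pvTd (3 - c) t with
      | none => simp
      | some q => push_cast; simp; ring

theorem pvB_main (l : List Char) : ∀ (s : List Char) (c q : Nat), c < 3 →
    pvTd (3 - c) l = some q →
    (match pvAltGo c (l.zip s) with | some r => r | none => false) =
      decide (l.take (q + 1) = s.take (q + 1)) := by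
  induction l with
  | nil => intro s c q _ h; simp [pvTd] at h
  | cons a t ih =>
    intro s c q hc htd
    cases s with
    | nil => simp [pvAltGo]
    | cons b s' =>
      by_cases hab : a = b
      · subst hab
        by_cases ha : a = '.'
        · subst ha
          by_cases h2 : c = 2
          · subst h2
            have : (3 : Nat) - 2 = 1 := by omega
            rw [this] at htd
            simp [pvTd] at htd
            subst htd
            simp [pvAltGo]
          · have hk1 : (3 - c) ≠ 1 := by omega
            have hkk : 3 - c - 1 = 3 - (c + 1) := by omega
            simp only [pvTd, if_pos, hk1, if_neg, not_false_iff, hkk, Option.map_eq_some_iff] at htd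
            obtain ⟨q', hq', rfl⟩ := htd
            have h3 : c + 1 ≠ 3 := by omega
            simp only [List.zip_cons_cons, pvAltGo, ne_eq, not_true_eq_false, if_neg,
              not_false_iff, if_pos, h3, reduceIte]
            rw [ih s' (c + 1) q' (by omega) hq']
            simp
        · simp only [pvTd, ha, if_neg, not_false_iff, Option.map_eq_some_iff] at htd
          obtain ⟨q', hq', rfl⟩ := htd
          simp only [List.zip_cons_cons, pvAltGo, ne_eq, not_true_eq_false, if_neg,
            not_false_iff, ha, reduceIte]
          rw [ih s' c q' hc hq']
          simp
      · simp only [List.zip_cons_cons, pvAltGo, ne_eq, hab, not_false_iff, if_pos, reduceIte]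
        simp [List.take_succ_cons, hab]

theorem pvBeq_toList (x y : String) : (x == y) = decide (x.toList = y.toList) := by
  rw [Bool.eq_iff_iff]; simp [String.toList_inj]

-- ===== VERDICT (by name: the statement is the Claim_ definition above) =====
theorem check_net_spec : Claim_equal_check_net := by
  intro net src dest _
  unfold Spec_check_net check_net check_net_alt
  have hcnt : PySem.Str.count net "." = net.toList.count '.' := by
    rw [PySem.Str.count_eq, show (".").toList = ['.'] from by decide, pvCount_dot]
  simp only [hcnt]
  by_cases hc : net.toList.count '.' < 3
  · -- fewer than three dots: both sides are true
    have htd : pvTd 3 net.toList = none := (pvTd_none_iff net.toList 3 (by omega)).2 hc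
    have hA := pvA_main net.toList 0 0 0 (by omega)
    simp only [Nat.cast_zero, htd] at hA
    simp only [hA, if_pos hc]
    simp only [pvBeq_toList, PySem.Str.toList_slice, PySem.Chars.slice_eq_listSlice, Bool.or_self]
    rw [PySem.List.slice_to net.toList (b := 0) (by omega),
        PySem.List.slice_to src.toList (b := 0) (by omega)]
    simp
  · -- at least three dots: index is one past the third dot in both
    obtain ⟨q, hq⟩ : ∃ q, pvTd 3 net.toList = some q := by
      cases h : pvTd 3 net.toList with
      | none => exact absurd ((pvTd_none_iff net.toList 3 (by omega)).1 h) hc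
      | some q => exact ⟨q, rfl⟩
    have hA := pvA_main net.toList 0 0 0 (by omega)
    simp only [Nat.cast_zero, hq, zero_add] at hA
    simp only [hA, if_neg hc]
    rw [pvB_main net.toList src.toList 0 q (by omega) hq]
    simp only [pvBeq_toList, PySem.Str.toList_slice, PySem.Chars.slice_eq_listSlice, Bool.or_self]
    rw [PySem.List.slice_to net.toList (b := (q : Int) + 1) (by omega),
        PySem.List.slice_to src.toList (b := (q : Int) + 1) (by omega)]
    have hT : ((q : Int) + 1).toNat = q + 1 := by omega
    simp [hT]
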